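-- pv_equiv track=rewrite | github.com/ErickMwazonga/sifu | general/pool_calculation.py | pool_calculation
-- ===== SOURCE A (Python) =====
-- from collections import defaultdict
--
-- def pool_calculation(player1, player2, GAME_AMOUNT):
--     total_games = player1 + player2
--     BOSS_POOL_AMOUNT = 20
--     WINNER_TAKE_HOME = GAME_AMOUNT - BOSS_POOL_AMOUNT
--     BOSS_POOL = 'BOSS_POOL'
--
--     results = defaultdict(int)
--
--     for i in range(total_games):
--         winner = 'A' if i < player1 else 'B'
--         loser = 'B' if i < player1 else 'A'
--
--         results[winner] += WINNER_TAKE_HOME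
--         results[loser] -= GAME_AMOUNT
--         results[BOSS_POOL] += BOSS_POOL_AMOUNT
--
--     return results
-- ===== SOURCE B (Python) =====
-- def pool_calculation(player1, player2, GAME_AMOUNT):
--     total_games = player1 + player2
--     if total_games <= 0:
--         return {}
--     take_home = GAME_AMOUNT - 20
--     return {
--         'A': player1 * take_home - player2 * GAME_AMOUNT,
--         'B': player2 * take_home - player1 * GAME_AMOUNT,
--         'BOSS_POOL': 20 * total_games,
--     }
-- ===== Notes on version B (the rewrite author's own statement) =====
-- stated objective: faster
-- what changed: Replaces A's per-game accumulation loop with closed-form arithmetic (each player's total is wins*take_home - losses*GAME_AMOUNT, the boss pool is 20*total_games, empty when no games); Pre_ excludes only player1 = 0 with player2 > 0, where both dicts hold the same values and only A's accidental insertion order (B's key first) differs.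
-- intended difference: On a negative win count with a positive total, A returns totals as if the negative count were clamped game by game (a negative player1 counts as 0 wins and caps the other's games), while B applies the stated counts at face value in the closed form; negative counts are an unspecified corner and B's linear reading is the intended meaning. — e.g. on pool_calculation(-1, 2, 30): A returns [("B", 10), ("A", -30), ("BOSS_POOL", 20)], B returns [("A", -70), ("B", 50), ("BOSS_POOL", 20)]
import Mathlib
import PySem

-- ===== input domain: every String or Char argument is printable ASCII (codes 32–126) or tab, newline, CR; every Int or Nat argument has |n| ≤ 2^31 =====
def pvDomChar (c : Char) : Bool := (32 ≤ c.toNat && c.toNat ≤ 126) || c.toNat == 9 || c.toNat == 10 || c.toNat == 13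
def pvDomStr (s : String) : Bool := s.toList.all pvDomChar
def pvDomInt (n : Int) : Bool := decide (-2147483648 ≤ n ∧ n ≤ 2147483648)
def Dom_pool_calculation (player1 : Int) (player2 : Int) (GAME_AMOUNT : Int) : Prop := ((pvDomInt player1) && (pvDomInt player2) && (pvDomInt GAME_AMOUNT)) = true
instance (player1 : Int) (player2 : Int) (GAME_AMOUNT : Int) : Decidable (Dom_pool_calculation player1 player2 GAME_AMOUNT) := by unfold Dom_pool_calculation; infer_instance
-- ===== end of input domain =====

-- B replaces A's per-game accumulation loop by closed-form arithmetic (objective: faster).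

-- ===== PORT A =====
-- one loop iteration of A's body (winner/loser picked by i < player1; defaultdict reads default to 0)
def pcStep (player1 : Int) (GAME_AMOUNT : Int) (d : PySem.Dict String Int) (i : Int) : PySem.Dict String Int :=
  let winner : String := if i < player1 then "A" else "B"
  let loser : String := if i < player1 then "B" else "A"
  let d1 := d.insert winner (d.getD winner 0 + (GAME_AMOUNT - 20))
  let d2 := d1.insert loser (d1.getD loser 0 - GAME_AMOUNT)
  d2.insert "BOSS_POOL" (d2.getD "BOSS_POOL" 0 + 20)

def pool_calculation (player1 : Int) (player2 : Int) (GAME_AMOUNT : Int) : List (String × Int) :=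
  ((PySem.List.pyRange 0 (player1 + player2) 1).foldl (pcStep player1 GAME_AMOUNT) PySem.Dict.empty).items

-- ===== PORT B =====
def pool_calculation_alt (player1 : Int) (player2 : Int) (GAME_AMOUNT : Int) : List (String × Int) :=
  let total_games := player1 + player2
  if total_games ≤ 0 then []
  else
    let take_home := GAME_AMOUNT - 20
    [("A", player1 * take_home - player2 * GAME_AMOUNT),
     ("B", player2 * take_home - player1 * GAME_AMOUNT),
     ("BOSS_POOL", 20 * total_games)]

-- ===== PRECONDITION & SPEC =====
-- Pre_ excludes only player1 = 0 with player2 > 0: there A's dict and B's dict hold the SAME three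
-- values and differ only in A's accidental insertion order (B's key first) — a corner where either
-- key order is defensible.
def Pre_pool_calculation (player1 : Int) (player2 : Int) (GAME_AMOUNT : Int) : Prop :=
  ¬ (player1 = 0 ∧ 0 < player2)
instance (player1 : Int) (player2 : Int) (GAME_AMOUNT : Int) : Decidable (Pre_pool_calculation player1 player2 GAME_AMOUNT) := by unfold Pre_pool_calculation; infer_instance

def pvWitness_pool_calculation : Int × Int × Int := (2, 1, 100)

-- On a negative win count with a positive total, A returns totals as if the negative count were
-- clamped game by game (e.g. a negative player1 counts as 0 wins and caps the other's games), while
-- B applies the stated counts at face value (wins*take_home - losses*GAME_AMOUNT); negative counts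
-- are an unspecified corner and B's linear reading is the intended meaning of the closed form.
def D_pool_calculation (player1 : Int) (player2 : Int) (GAME_AMOUNT : Int) : Prop :=
  0 < player1 + player2 ∧ (player1 < 0 ∨ player2 < 0)
instance (player1 : Int) (player2 : Int) (GAME_AMOUNT : Int) : Decidable (D_pool_calculation player1 player2 GAME_AMOUNT) := by unfold D_pool_calculation; infer_instance

def Spec_pool_calculation (player1 : Int) (player2 : Int) (GAME_AMOUNT : Int) (out : List (String × Int)) : Prop := ¬ D_pool_calculation player1 player2 GAME_AMOUNT → out = pool_calculation_alt player1 player2 GAME_AMOUNT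
instance (player1 : Int) (player2 : Int) (GAME_AMOUNT : Int) (out : List (String × Int)) : Decidable (Spec_pool_calculation player1 player2 GAME_AMOUNT out) := by unfold Spec_pool_calculation; infer_instance

def pvDiffWitness_pool_calculation : Int × Int × Int := (-1, 2, 30)
def pvDiffWitnessOut_pool_calculation : (List (String × Int)) × (List (String × Int)) :=
  ([("B", 10), ("A", -30), ("BOSS_POOL", 20)], [("A", -70), ("B", 50), ("BOSS_POOL", 20)])

-- ===== CLAIM (what is proved, stated in full; the proofs are below) =====
def Claim_unchanged_pool_calculation : Prop := ∀ (player1 : Int) (player2 : Int) (GAME_AMOUNT : Int), Dom_pool_calculation player1 player2 GAME_AMOUNT → Pre_pool_calculation player1 player2 GAME_AMOUNT → Spec_pool_calculation player1 player2 GAME_AMOUNT (pool_calculation player1 player2 GAME_AMOUNT)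
def Claim_changed_pool_calculation : Prop := Dom_pool_calculation (pvDiffWitness_pool_calculation.1) (pvDiffWitness_pool_calculation.2.1) (pvDiffWitness_pool_calculation.2.2) ∧ Pre_pool_calculation (pvDiffWitness_pool_calculation.1) (pvDiffWitness_pool_calculation.2.1) (pvDiffWitness_pool_calculation.2.2) ∧ D_pool_calculation (pvDiffWitness_pool_calculation.1) (pvDiffWitness_pool_calculation.2.1) (pvDiffWitness_pool_calculation.2.2) ∧ pool_calculation (pvDiffWitness_pool_calculation.1) (pvDiffWitness_pool_calculation.2.1) (pvDiffWitness_pool_calculation.2.2) = pvDiffWitnessOut_pool_calculation.1 ∧ pool_calculation_alt (pvDiffWitness_pool_calculation.1) (pvDiffWitness_pool_calculation.2.1) (pvDiffWitness_pool_calculation.2.2) = pvDiffWitnessOut_pool_calculation.2 ∧ pvDiffWitnessOut_pool_calculation.1 ≠ pvDiffWitnessOut_pool_calculation.2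

-- ===== LEMMAS AND PROOFS =====

-- the state of A's dict after the first n ≥ 1 games when player1 ≥ 1, written in closed form
def pcDict (player1 GAME_AMOUNT n : Int) : PySem.Dict String Int :=
  let wa := min player1 n
  let wb := n - wa
  let W := GAME_AMOUNT - 20
  PySem.Dict.mk [("A", wa * W - wb * GAME_AMOUNT), ("B", wb * W - wa * GAME_AMOUNT), ("BOSS_POOL", 20 * n)]

lemma pcStep_pcDict (p1 G n : Int) :
    pcStep p1 G (pcDict p1 G n) n = pcDict p1 G (n + 1) := by
  by_cases h : n < p1
  · have hwa : min p1 n = n := by omega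
    have hwa' : min p1 (n + 1) = n + 1 := by omega
    simp only [pcStep, pcDict, hwa, hwa']
    simp [h, PySem.Dict.insert, PySem.Dict.getD, PySem.Dict.get?, PySem.Dict.contains]
    ring_nf
    try exact ⟨trivial, trivial, trivial⟩
  · have hwa' : min p1 (n + 1) = min p1 n := by omega
    simp only [pcStep, pcDict, hwa']
    simp [h, PySem.Dict.insert, PySem.Dict.getD, PySem.Dict.get?, PySem.Dict.contains]
    ring_nf
    try exact ⟨trivial, trivial, trivial⟩

lemma pc_loop (p1 G : Int) (hp1 : 1 ≤ p1) (n : Nat) (hn : 1 ≤ n) :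
    (PySem.List.pyRange 0 (n : Int) 1).foldl (pcStep p1 G) PySem.Dict.empty = pcDict p1 G n := by
  induction n with
  | zero => omega
  | succ m ih =>
    by_cases hm : 1 ≤ m
    · have hcast : ((m + 1 : Nat) : Int) = (m : Int) + 1 := by push_cast; ring
      rw [hcast, PySem.List.pyRange_one_succ_right (by positivity), List.foldl_append]
      rw [ih hm]
      simpa using pcStep_pcDict p1 G m
    · have hm1 : m = 0 := by omega
      subst hm1
      rw [show (PySem.List.pyRange 0 ((0 + 1 : Nat) : Int) 1) = [0] from by decide]
      have h0 : (0 : Int) < p1 := by omega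
      have hw : min p1 1 = 1 := by omega
      simp [List.foldl, pcStep, pcDict, h0, hw, PySem.Dict.empty, PySem.Dict.insert,
        PySem.Dict.getD, PySem.Dict.get?, PySem.Dict.contains]
      try ring_nf
      try exact ⟨trivial, trivial, trivial⟩

-- ===== VERDICT (by name: the statement is the Claim_ definition above) =====
theorem pool_calculation_spec : Claim_unchanged_pool_calculation := by
  intro p1 p2 G _ hpre
  unfold Spec_pool_calculation
  intro hnd
  unfold pool_calculation pool_calculation_alt
  by_cases htot : p1 + p2 ≤ 0
  · rw [PySem.List.pyRange_one_eq_nil htot]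
    simp [htot, PySem.Dict.empty]
  · unfold D_pool_calculation at hnd
    unfold Pre_pool_calculation at hpre
    have hp1 : 1 ≤ p1 := by omega
    have hcast : (p1 + p2) = (((p1 + p2).toNat : Nat) : Int) := by omega
    rw [hcast, pc_loop p1 G hp1 _ (by omega)]
    rw [← hcast]
    have hwa : min p1 (p1 + p2) = p1 := by omega
    simp [htot, pcDict, hwa]

theorem pool_calculation_changed : Claim_changed_pool_calculation := by
  unfold Claim_changed_pool_calculation; decide
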